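-- pv_equiv track=rewrite | github.com/droneshire/crabnft | src/crabada/teams.py | assign_crabs_to_groups
-- ===== SOURCE A (Python) =====
-- import typing as T
--
-- LOOTING_GROUP_NUM = 0
--
-- INACTIVE_GROUP_NUM = -1
--
-- CRABS_PER_GROUP = 2
--
-- def assign_crabs_to_groups(
--     crabs: T.Dict[int, int], groups: T.List[int]
-- ) -> T.Dict[int, int]:
--     crab_assignments = {}
--     num_crabs = 0
--     group_inx = 0
--     crab_list = sorted(list(crabs.keys()))
--     for crab in crab_list:
--         group = crabs[crab]
--         if group in [LOOTING_GROUP_NUM, INACTIVE_GROUP_NUM]: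
--             crab_assignments[crab] = group
--             continue
--         if len(groups) < group_inx + 1:
--             continue
--         num_crabs += 1
--         crab_assignments[crab] = groups[group_inx]
--         if num_crabs > CRABS_PER_GROUP:
--             num_crabs = 0
--             group_inx += 1
--     return crab_assignments
-- ===== SOURCE B (Python) =====
-- LOOTING_GROUP_NUM = 0
--
-- INACTIVE_GROUP_NUM = -1
--
-- CRABS_PER_GROUP = 2
--
--
-- def assign_crabs_to_groups(crabs, groups):
--     order = sorted(crabs.keys())
--     rank = {
--         c: j
--         for j, c in enumerate(
--             c for c in order
--             if crabs[c] not in (LOOTING_GROUP_NUM, INACTIVE_GROUP_NUM)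
--         )
--     }
--     out = {}
--     for c in order:
--         if c not in rank:
--             out[c] = crabs[c]
--         elif rank[c] // (CRABS_PER_GROUP + 1) < len(groups):
--             out[c] = groups[rank[c] // (CRABS_PER_GROUP + 1)]
--     return out
-- ===== Notes on version B (the rewrite author's own statement) =====
-- stated objective: simpler
-- what changed: Replaces A's stateful num_crabs/group_inx counters (with an increment-and-reset rule) by a precomputed rank dictionary over the active crabs and the closed-form group index rank // (CRABS_PER_GROUP + 1).
import Mathlib
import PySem

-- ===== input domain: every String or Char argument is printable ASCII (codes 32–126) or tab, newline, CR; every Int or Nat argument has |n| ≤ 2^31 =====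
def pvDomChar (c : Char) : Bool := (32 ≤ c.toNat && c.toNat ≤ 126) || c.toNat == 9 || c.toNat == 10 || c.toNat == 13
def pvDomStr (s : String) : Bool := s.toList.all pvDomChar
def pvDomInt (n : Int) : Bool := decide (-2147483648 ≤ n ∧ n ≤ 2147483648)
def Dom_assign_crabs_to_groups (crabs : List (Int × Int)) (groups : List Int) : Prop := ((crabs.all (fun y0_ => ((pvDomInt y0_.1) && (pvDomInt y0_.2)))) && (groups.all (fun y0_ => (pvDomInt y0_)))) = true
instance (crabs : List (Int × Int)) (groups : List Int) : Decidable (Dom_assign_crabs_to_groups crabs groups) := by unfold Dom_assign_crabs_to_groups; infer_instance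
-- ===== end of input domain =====

-- B replaces A's stateful num_crabs/group_inx counters by a precomputed rank of each
-- active crab and a closed-form index rank // 3 (objective: simpler decomposition).

-- ===== PORT A =====
-- literal transliteration of A; crabs[crab] is ported as getD … 0, exact since crab ∈ keys
def assign_crabs_to_groups (crabs : List (Int × Int)) (groups : List Int) : List (Int × Int) :=
  let d := PySem.Dict.ofList crabs
  let crab_list := PySem.List.sorted d.keys (fun x => x) false
  let st := crab_list.foldl (fun (st : PySem.Dict Int Int × Int × Int) crab =>
      let ca := st.1
      let num_crabs := st.2.1
      let group_inx := st.2.2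
      let group := d.getD crab 0
      if group = 0 ∨ group = -1 then   -- group in [LOOTING_GROUP_NUM, INACTIVE_GROUP_NUM]
        (ca.insert crab group, num_crabs, group_inx)
      else if (groups.length : Int) < group_inx + 1 then
        (ca, num_crabs, group_inx)
      else
        let num_crabs := num_crabs + 1
        let ca := ca.insert crab (PySem.List.pyGetD groups group_inx 0)  -- groups[group_inx], in range here
        if num_crabs > 2 then (ca, 0, group_inx + 1) else (ca, num_crabs, group_inx))
    (PySem.Dict.empty, 0, 0)
  st.1.items

-- ===== PORT B =====
-- literal transliteration of Source B; crabs[c]/rank[c] lookups via getD/get? (keys present)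
def assign_crabs_to_groups_alt (crabs : List (Int × Int)) (groups : List Int) : List (Int × Int) :=
  let d := PySem.Dict.ofList crabs
  let order := PySem.List.sorted d.keys (fun x => x) false
  let rank := (PySem.List.enumerate
      (order.filter (fun c => !(d.getD c 0 == 0 || d.getD c 0 == -1)))).foldl
      (fun (r : PySem.Dict Int Int) p => r.insert p.2 p.1) PySem.Dict.empty
  let out := order.foldl (fun (out : PySem.Dict Int Int) c =>
      match rank.get? c with
      | none => out.insert c (d.getD c 0)
      | some r =>
        if PySem.Int.floordiv r 3 < (groups.length : Int) then
          out.insert c (PySem.List.pyGetD groups (PySem.Int.floordiv r 3) 0)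
        else out)
    PySem.Dict.empty
  out.items

-- ===== PRECONDITION & SPEC =====
def Spec_assign_crabs_to_groups (crabs : List (Int × Int)) (groups : List Int) (out : List (Int × Int)) : Prop := out = assign_crabs_to_groups_alt crabs groups
instance (crabs : List (Int × Int)) (groups : List Int) (out : List (Int × Int)) : Decidable (Spec_assign_crabs_to_groups crabs groups out) := by unfold Spec_assign_crabs_to_groups; infer_instance

-- ===== CLAIM (what is proved, stated in full; the proofs are below) =====
def Claim_equal_assign_crabs_to_groups : Prop := ∀ (crabs : List (Int × Int)) (groups : List Int), Dom_assign_crabs_to_groups crabs groups → Spec_assign_crabs_to_groups crabs groups (assign_crabs_to_groups crabs groups)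

-- ===== LEMMAS AND PROOFS =====

-- "active" predicate of port B's filter
def pvAct (d : PySem.Dict Int Int) (c : Int) : Bool := !(d.getD c 0 == 0 || d.getD c 0 == -1)

-- the rank dictionary of port B
def pvRank (act : List Int) : PySem.Dict Int Int :=
  (PySem.List.enumerate act).foldl (fun (r : PySem.Dict Int Int) p => r.insert p.2 p.1) PySem.Dict.empty

-- the loop bodies of the two ports
def pvStepA (d : PySem.Dict Int Int) (groups : List Int)
    (st : PySem.Dict Int Int × Int × Int) (crab : Int) : PySem.Dict Int Int × Int × Int :=
  let ca := st.1
  let num_crabs := st.2.1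
  let group_inx := st.2.2
  let group := d.getD crab 0
  if group = 0 ∨ group = -1 then
    (ca.insert crab group, num_crabs, group_inx)
  else if (groups.length : Int) < group_inx + 1 then
    (ca, num_crabs, group_inx)
  else
    let num_crabs := num_crabs + 1
    let ca := ca.insert crab (PySem.List.pyGetD groups group_inx 0)
    if num_crabs > 2 then (ca, 0, group_inx + 1) else (ca, num_crabs, group_inx)

def pvStepB (d rank : PySem.Dict Int Int) (groups : List Int)
    (out : PySem.Dict Int Int) (c : Int) : PySem.Dict Int Int :=
  match rank.get? c with
  | none => out.insert c (d.getD c 0)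
  | some r =>
    if PySem.Int.floordiv r 3 < (groups.length : Int) then
      out.insert c (PySem.List.pyGetD groups (PySem.Int.floordiv r 3) 0)
    else out

lemma pv_portA_eq (crabs : List (Int × Int)) (groups : List Int) :
    assign_crabs_to_groups crabs groups =
      ((PySem.List.sorted (PySem.Dict.ofList crabs).keys (fun x => x) false).foldl
        (pvStepA (PySem.Dict.ofList crabs) groups) (PySem.Dict.empty, 0, 0)).1.items := rfl

lemma pv_portB_eq (crabs : List (Int × Int)) (groups : List Int) :
    assign_crabs_to_groups_alt crabs groups =
      ((PySem.List.sorted (PySem.Dict.ofList crabs).keys (fun x => x) false).foldl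
        (pvStepB (PySem.Dict.ofList crabs)
          (pvRank ((PySem.List.sorted (PySem.Dict.ofList crabs).keys (fun x => x) false).filter
            (pvAct (PySem.Dict.ofList crabs)))) groups)
        PySem.Dict.empty).items := rfl

lemma pv_rank_keys (act : List Int) : (pvRank act).keys = PySem.Set.ofList act := by
  unfold pvRank
  rw [PySem.Dict.keys_foldl_insert_key (key := fun (p : Int × Int) => p.2)]
  simp [PySem.List.map_snd_enumerate, PySem.Set.update_nil_left]

lemma pv_rank_get?_none {act : List Int} {c : Int} (h : c ∉ act) :
    (pvRank act).get? c = none := by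
  rw [PySem.Dict.get?_eq_none_iff_not_mem_keys, pv_rank_keys]
  simpa [PySem.Set.mem_ofList] using h

lemma pv_rank_get?_pos {act pre suf : List Int} {c : Int} (hnd : act.Nodup)
    (hact : act = pre ++ c :: suf) :
    (pvRank act).get? c = some (pre.length : Int) := by
  have hitems : (pvRank act).items = (PySem.List.enumerate act).map (fun p => (p.2, p.1)) := by
    unfold pvRank
    rw [PySem.Dict.items_foldl_insert_fresh (k := fun (p : Int × Int) => p.2) (v := fun p => p.1)]
    · rfl
    · intro a _; simp
    · simpa [PySem.List.map_snd_enumerate] using hnd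
  have hkeys : (pvRank act).keys.Nodup := by
    rw [pv_rank_keys]; exact PySem.Set.nodup_ofList act
  have hmem : ((pre.length : Int), c) ∈ PySem.List.enumerate act := by
    rw [PySem.List.mem_enumerate_iff]
    refine ⟨pre.length, by simp [hact], ?_⟩
    simp [hact, List.getElem_append_right (le_refl pre.length)]
  have hmem' : (c, (pre.length : Int)) ∈ (pvRank act).items := by
    rw [hitems]
    exact List.mem_map.mpr ⟨((pre.length : Int), c), hmem, rfl⟩
  exact PySem.Dict.get?_of_mem_items _ hmem' hkeys

lemma pv_floordiv3 (j : Nat) : PySem.Int.floordiv (j : Int) 3 = ((j / 3 : Nat) : Int) := by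
  exact_mod_cast PySem.Int.floordiv_natCast j 3

lemma pv_main (d : PySem.Dict Int Int) (groups : List Int) (act : List Int) (hnd : act.Nodup) :
    ∀ (cs pre : List Int) (ca : PySem.Dict Int Int),
      act = pre ++ cs.filter (pvAct d) →
      (∀ x ∈ pre, pvAct d x = true) →
      (cs.foldl (pvStepA d groups)
        (ca, ((min pre.length (3 * groups.length) % 3 : Nat) : Int),
             ((min pre.length (3 * groups.length) / 3 : Nat) : Int))).1
        = cs.foldl (pvStepB d (pvRank act) groups) ca := by
  intro cs
  induction cs with
  | nil => intro pre ca _ _; simp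
  | cons c cs ih =>
    intro pre ca hact hpre
    by_cases h : pvAct d c = true
    · -- active crab
      have hact' : act = (pre ++ [c]) ++ cs.filter (pvAct d) := by
        simpa [List.filter_cons, h] using hact
      have hrank : (pvRank act).get? c = some (pre.length : Int) := by
        apply pv_rank_get?_pos hnd
        simpa using hact'
      have hne : ¬(d.getD c 0 = 0 ∨ d.getD c 0 = -1) := by
        simpa [pvAct, not_or] using h
      rw [List.foldl_cons, List.foldl_cons]
      have hpre' : ∀ x ∈ pre ++ [c], pvAct d x = true := by
        intro x hx
        rcases List.mem_append.mp hx with hx | hx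
        · exact hpre x hx
        · simp at hx; subst hx; exact h
      by_cases hsk : (groups.length : Int) < ((min pre.length (3 * groups.length) / 3 : Nat) : Int) + 1
      · -- A skips: group_inx is out of range; B skips too
        have hBsk : ¬ ((pre.length / 3 : Nat) : Int) < (groups.length : Int) := by omega
        have hA : pvStepA d groups (ca,
            ((min pre.length (3 * groups.length) % 3 : Nat) : Int),
            ((min pre.length (3 * groups.length) / 3 : Nat) : Int)) c = (ca,
            ((min pre.length (3 * groups.length) % 3 : Nat) : Int),
            ((min pre.length (3 * groups.length) / 3 : Nat) : Int)) := by
          simp only [pvStepA, if_neg hne, if_pos hsk]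
        rw [hA]
        have hB : pvStepB d (pvRank act) groups ca c = ca := by
          simp only [pvStepB, hrank]
          rw [pv_floordiv3, if_neg hBsk]
        rw [hB]
        have e1 : ((min pre.length (3 * groups.length) % 3 : Nat) : Int)
            = ((min (pre ++ [c]).length (3 * groups.length) % 3 : Nat) : Int) := by
          simp only [List.length_append, List.length_singleton]; omega
        have e2 : ((min pre.length (3 * groups.length) / 3 : Nat) : Int)
            = ((min (pre ++ [c]).length (3 * groups.length) / 3 : Nat) : Int) := by
          simp only [List.length_append, List.length_singleton]; omega
        rw [e1, e2]
        exact ih (pre ++ [c]) ca hact' hpre'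
      · -- A assigns groups[group_inx]; B assigns groups[rank // 3]
        have hj : pre.length < 3 * groups.length := by omega
        have hm : min pre.length (3 * groups.length) = pre.length := by omega
        have hBas : ((pre.length / 3 : Nat) : Int) < (groups.length : Int) := by omega
        have hB : pvStepB d (pvRank act) groups ca c
            = ca.insert c (PySem.List.pyGetD groups ((pre.length / 3 : Nat) : Int) 0) := by
          simp only [pvStepB, hrank]
          rw [pv_floordiv3, if_pos hBas]
        rw [hB]
        set ca' := ca.insert c (PySem.List.pyGetD groups ((pre.length / 3 : Nat) : Int) 0) with hca'
        have hsk' : ¬ (groups.length : Int) < ((pre.length / 3 : Nat) : Int) + 1 := by omega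
        have hA : pvStepA d groups (ca,
            ((min pre.length (3 * groups.length) % 3 : Nat) : Int),
            ((min pre.length (3 * groups.length) / 3 : Nat) : Int)) c = (ca',
            ((min (pre ++ [c]).length (3 * groups.length) % 3 : Nat) : Int),
            ((min (pre ++ [c]).length (3 * groups.length) / 3 : Nat) : Int)) := by
          simp only [pvStepA, if_neg hne, hm, hca']
          rw [if_neg hsk']
          by_cases hr : pre.length % 3 = 2
          · rw [if_pos (show ((pre.length % 3 : Nat) : Int) + 1 > 2 by omega)]
            simp only [List.length_append, List.length_singleton, Prod.mk.injEq]
            exact ⟨trivial, by omega, by omega⟩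
          · rw [if_neg (show ¬ ((pre.length % 3 : Nat) : Int) + 1 > 2 by omega)]
            simp only [List.length_append, List.length_singleton, Prod.mk.injEq]
            exact ⟨trivial, by omega, by omega⟩
        rw [hA]
        exact ih (pre ++ [c]) ca' hact' hpre'
    · -- looting / inactive crab: both insert its own group value
      have h' : pvAct d c = false := by simpa using h
      have heq : d.getD c 0 = 0 ∨ d.getD c 0 = -1 := by
        by_contra hc
        push Not at hc
        simp [pvAct, hc.1, hc.2] at h'
      have hact' : act = pre ++ cs.filter (pvAct d) := by
        simpa [List.filter_cons, h'] using hact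
      have hnotin : c ∉ act := by
        intro hc
        rw [hact'] at hc
        rcases List.mem_append.mp hc with hc | hc
        · rw [hpre c hc] at h'; exact absurd h' (by simp)
        · have := List.of_mem_filter hc
          rw [this] at h'; exact absurd h' (by simp)
      have hrank : (pvRank act).get? c = none := pv_rank_get?_none hnotin
      rw [List.foldl_cons, List.foldl_cons]
      have hA : pvStepA d groups (ca,
          ((min pre.length (3 * groups.length) % 3 : Nat) : Int),
          ((min pre.length (3 * groups.length) / 3 : Nat) : Int)) c = (ca.insert c (d.getD c 0),
          ((min pre.length (3 * groups.length) % 3 : Nat) : Int),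
          ((min pre.length (3 * groups.length) / 3 : Nat) : Int)) := by
        simp [pvStepA, heq]
      have hB : pvStepB d (pvRank act) groups ca c = ca.insert c (d.getD c 0) := by
        simp [pvStepB, hrank]
      rw [hA, hB]
      exact ih pre (ca.insert c (d.getD c 0)) hact' hpre

-- ===== VERDICT (by name: the statement is the Claim_ definition above) =====
theorem assign_crabs_to_groups_spec : Claim_equal_assign_crabs_to_groups := by
  intro crabs groups _
  unfold Spec_assign_crabs_to_groups
  rw [pv_portA_eq, pv_portB_eq]
  set d := PySem.Dict.ofList crabs with hd
  set order := PySem.List.sorted d.keys (fun x => x) false with horder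
  have hord_nd : order.Nodup := by
    rw [horder]
    exact ((PySem.List.sorted_perm d.keys (fun x => x) false).symm.nodup
      (by rw [hd]; exact PySem.Dict.nodup_keys_ofList crabs))
  have hnd : (order.filter (pvAct d)).Nodup := hord_nd.filter _
  have := pv_main d groups (order.filter (pvAct d)) hnd order [] PySem.Dict.empty (by simp) (by simp)
  simp only [List.length_nil, Nat.zero_min, Nat.zero_mod, Nat.zero_div,
    Nat.cast_zero] at this
  rw [this]
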